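-- pv_equiv track=rewrite | github.com/grapheneaffiliate/h4-polytopic-attention | solve_arc_b14.py | solve_963e52fc
-- ===== SOURCE A (Python) =====
-- def solve_963e52fc(grid):
--     rows = len(grid)
--     cols = len(grid[0])
--     new_cols = cols * 2
--     output = []
--
--     for r in range(rows):
--         row = grid[r]
--         if all(v == 0 for v in row):
--             output.append([0] * new_cols)
--         else:
--             # Find the repeating unit in the row
--             # The pattern repeats - extend it to double width
--             # Need to find the period of the pattern
--             new_row = []
--             for c in range(new_cols):
--                 # Try to continue the pattern
--                 # Find period
--                 new_row.append(row[c % cols] if c < cols else 0)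
--
--             # Actually, looking at examples more carefully:
--             # The pattern continues seamlessly. Let me find the period.
--             # Ex1: [2,8,2,8,2,8] -> [2,8,2,8,2,8,2,8,2,8,2,8] - period 2
--             # Ex2: [2,3,3,2,3,3,2] -> [2,3,3,2,3,3,2,3,3,2,3,3,2,3] - period 3
--             # Ex3: [1,2,2,1,2,2,1,2] -> [1,2,2,1,2,2,1,2,2,1,2,2,1,2,2,1] - period 3
--             #       [2,1,2,2,1,2,2,1] -> [2,1,2,2,1,2,2,1,2,2,1,2,2,1,2,2] - period 3
--
--             # Find the minimal period
--             best_period = None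
--             for p in range(1, cols + 1):
--                 valid = True
--                 for c in range(cols):
--                     if row[c] != row[c % p]:
--                         valid = False
--                         break
--                 if valid:
--                     best_period = p
--                     break
--
--             new_row = [row[c % best_period] for c in range(new_cols)]
--             output.append(new_row)
--
--     return output
-- ===== SOURCE B (Python) =====
-- def solve_963e52fc(grid):
--     cols = len(grid[0])
--     out = []
--     for row in grid:
--         t = row[:cols]
--         if not any(t):
--             out.append([0] * (2 * cols))
--             continue
--         n = cols
--         # KMP failure function of t: fail[i] = longest proper border of t[:i+1]
--         fail = [0] * n
--         k = 0
--         for i in range(1, n):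
--             while k > 0 and t[i] != t[k]:
--                 k = fail[k - 1]
--             if t[i] == t[k]:
--                 k += 1
--             fail[i] = k
--         p = n - fail[n - 1]          # minimal period of t
--         unit = t[:p]
--         out.append((unit * (2 * n // p + 1))[:2 * n])
--     return out
-- ===== Notes on version B (the rewrite author's own statement) =====
-- stated objective: faster
-- what changed: Replaces A's quadratic trial of every candidate period (re-scanning the row with modulo indexing for each candidate, plus a dead first pass and an all-zero special case on the full row) by a single KMP failure-function pass over the row prefix: minimal period = cols - longest proper border, then the period unit is tiled by list repetition.
import Mathlib
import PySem

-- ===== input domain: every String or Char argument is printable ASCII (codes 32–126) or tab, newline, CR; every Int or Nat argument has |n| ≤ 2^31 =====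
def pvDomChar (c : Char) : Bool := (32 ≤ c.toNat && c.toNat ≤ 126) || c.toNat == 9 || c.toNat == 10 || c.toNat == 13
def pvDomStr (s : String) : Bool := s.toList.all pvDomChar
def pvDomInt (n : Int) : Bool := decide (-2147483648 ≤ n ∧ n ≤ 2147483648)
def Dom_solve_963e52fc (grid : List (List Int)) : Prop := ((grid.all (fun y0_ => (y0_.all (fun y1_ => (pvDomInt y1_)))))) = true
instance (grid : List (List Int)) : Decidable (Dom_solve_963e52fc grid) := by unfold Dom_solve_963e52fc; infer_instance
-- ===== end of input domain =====

-- B replaces A's quadratic per-row trial of every candidate period by one KMP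
-- failure-function pass (minimal period = cols - longest proper border) and tiles
-- the period unit by list repetition; same return value wherever A returns.

-- ===== PORT A =====
-- inner check of A's period loop: `all(row[c] == row[c % p] for c in range(cols))`
def aValid (row : List Int) (cols p : Nat) : Bool :=
  (List.range cols).all (fun c => row.getD c 0 == row.getD (c % p) 0)

-- A's `for p in range(1, cols+1): … break` scan for the first valid period
def aLoop (row : List Int) (cols : Nat) : List Nat → Option Nat
  | [] => none
  | p :: ps => if aValid row cols p then some p else aLoop row cols ps

def solve_963e52fc (grid : List (List Int)) : List (List Int) :=
  let cols := (grid.headD []).length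
  let new_cols := cols * 2
  grid.map (fun row =>
    if row.all (fun v => v == 0) then
      List.replicate new_cols 0
    else
      -- A's first (dead) construction of new_row, later overwritten
      let _new_row := (List.range new_cols).map
        (fun c => if c < cols then row.getD (c % cols) 0 else 0)
      match aLoop row cols (List.range' 1 cols) with
      | some p => (List.range new_cols).map (fun c => row.getD (c % p) 0)
      | none => [])   -- only reached when cols = 0: Python's comprehension over range(0) is []

-- ===== PORT B =====
-- `while k > 0 and row[i] != row[k]: k = fail[k-1]`  (the guard k' < k only makes
-- the recursion total; it always holds for the fail tables B builds)
def kmpWhile (row : List Int) (fail : List Nat) (i : Nat) (k : Nat) : Nat :=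
  if k ≠ 0 ∧ row.getD i 0 ≠ row.getD k 0 then
    let k' := fail.getD (k - 1) 0
    if _h : k' < k then kmpWhile row fail i k' else k
  else k
termination_by k

-- body of B's `for i in range(1, n)` loop; state = (fail, k)
def kmpStep (row : List Int) (st : List Nat × Nat) (i : Nat) : List Nat × Nat :=
  let k0 := kmpWhile row st.1 i st.2
  let k1 := if row.getD i 0 == row.getD k0 0 then k0 + 1 else k0
  (st.1.set i k1, k1)

def solve_963e52fc_alt (grid : List (List Int)) : List (List Int) :=
  let cols := (grid.headD []).length
  grid.map (fun row =>
    let t := row.take cols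
    if t.all (fun v => v == 0) then List.replicate (2 * cols) 0
    else
      let n := cols
      let fail := ((List.range' 1 (n - 1)).foldl (kmpStep t) (List.replicate n 0, 0)).1
      let p := n - fail.getD (n - 1) 0
      let unit := t.take p
      (List.flatten (List.replicate (2 * n / p + 1) unit)).take (2 * n))

-- ===== PRECONDITION & SPEC =====
-- Pre_ is exactly A's return domain: A raises (IndexError) on the empty grid and on
-- any row that has a nonzero entry but is shorter than the first row.
def Pre_solve_963e52fc (grid : List (List Int)) : Prop :=
  grid ≠ [] ∧ ∀ row ∈ grid,
    row.all (fun v => v == 0) = true ∨ (grid.headD []).length ≤ row.length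
instance (grid : List (List Int)) : Decidable (Pre_solve_963e52fc grid) := by
  unfold Pre_solve_963e52fc; infer_instance

def pvWitness_solve_963e52fc : List (List Int) := [[1, 2, 1, 2], [0, 0, 0, 0]]

def Spec_solve_963e52fc (grid : List (List Int)) (out : List (List Int)) : Prop := out = solve_963e52fc_alt grid
instance (grid : List (List Int)) (out : List (List Int)) : Decidable (Spec_solve_963e52fc grid out) := by unfold Spec_solve_963e52fc; infer_instance

-- ===== CLAIM (what is proved, stated in full; the proofs are below) =====
def Claim_equal_solve_963e52fc : Prop := ∀ (grid : List (List Int)), Dom_solve_963e52fc grid → Pre_solve_963e52fc grid → Spec_solve_963e52fc grid (solve_963e52fc grid)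

-- ===== LEMMAS AND PROOFS =====

-- `k is a border of s` (as a plain equation; meaningful for k ≤ s.length)
abbrev mbP (s : List Int) (k : Nat) : Prop := s.take k = s.drop (s.length - k)

-- longest proper border of s
def mb (s : List Int) : Nat := Nat.findGreatest (mbP s) (s.length - 1)

theorem mbP_zero (s : List Int) : mbP s 0 := by simp [mbP]

theorem mb_lt (s : List Int) (hs : s ≠ []) : mb s < s.length := by
  have h1 : 0 < s.length := List.length_pos_iff.mpr hs
  have := Nat.findGreatest_le (P := mbP s) (s.length - 1)
  unfold mb; omega

theorem mb_mbP (s : List Int) : mbP s (mb s) := by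
  rcases Nat.eq_zero_or_pos (mb s) with h | h
  · rw [h]; exact mbP_zero s
  · exact Nat.findGreatest_spec (P := mbP s) (Nat.zero_le _) (mbP_zero s)

theorem mb_greatest (s : List Int) (j : Nat) (hj : mbP s j) (hle : j ≤ s.length - 1) : j ≤ mb s := by
  exact Nat.le_findGreatest hle hj

-- border of a border is a border
theorem chain1 (s : List Int) (b j : Nat) (hb : mbP s b) (hbl : b ≤ s.length)
    (hj : mbP (s.take b) j) (hjl : j ≤ b) : mbP s j := by
  unfold mbP at *
  rw [List.length_take, Nat.min_eq_left hbl] at hj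
  calc s.take j = (s.take b).take j := by rw [List.take_take, Nat.min_eq_left hjl]
    _ = (s.take b).drop (b - j) := hj
    _ = (s.drop (s.length - b)).drop (b - j) := by rw [hb]
    _ = s.drop (s.length - j) := by rw [List.drop_drop]; congr 1; omega

-- a smaller border is a border of a larger border
theorem chain2 (s : List Int) (b j : Nat) (hb : mbP s b) (hbl : b ≤ s.length)
    (hj : mbP s j) (hjl : j ≤ b) : mbP (s.take b) j := by
  unfold mbP at *
  rw [List.length_take, Nat.min_eq_left hbl]
  calc (s.take b).take j = s.take j := by rw [List.take_take, Nat.min_eq_left hjl]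
    _ = s.drop (s.length - j) := hj
    _ = (s.drop (s.length - b)).drop (b - j) := by rw [List.drop_drop]; congr 1; omega
    _ = (s.take b).drop (b - j) := by rw [hb]

-- extension: borders of s ++ [a]
theorem mbP_ext (s : List Int) (a : Int) (m : Nat) (hm : m < s.length) :
    mbP (s ++ [a]) (m + 1) ↔ (mbP s m ∧ s.getD m 0 = a) := by
  unfold mbP
  have hL : (s ++ [a]).length = s.length + 1 := by simp
  rw [hL]
  have h1 : (s ++ [a]).take (m + 1) = s.take m ++ [s.getD m 0] := by
    rw [List.take_append_of_le_length (by omega)]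
    rw [List.take_add_one]
    simp [List.getD_eq_getElem?_getD, List.getElem?_eq_getElem hm]
  have h2 : (s ++ [a]).drop (s.length + 1 - (m + 1)) = s.drop (s.length - m) ++ [a] := by
    rw [show s.length + 1 - (m + 1) = s.length - m by omega]
    exact List.drop_append_of_le_length (by omega)
  rw [h1, h2]
  constructor
  · intro h
    have := List.append_inj' h (by simp)
    exact ⟨this.1, by simpa using this.2⟩
  · rintro ⟨h3, h4⟩
    rw [h3, h4]

theorem kmpWhile_spec (t : List Int) (fail : List Nat) (i : Nat) (hi : i < t.length)
    (hfail : ∀ j < i, fail.getD j 0 = mb (t.take (j + 1))) :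
    ∀ k, mbP (t.take i) k → k < i →
      (∀ j, k < j → j < i → mbP (t.take i) j → t.getD i 0 ≠ t.getD j 0) →
      mbP (t.take i) (kmpWhile t fail i k) ∧ kmpWhile t fail i k < i ∧
      (∀ j, kmpWhile t fail i k < j → j < i → mbP (t.take i) j → t.getD i 0 ≠ t.getD j 0) ∧
      (kmpWhile t fail i k = 0 ∨ t.getD i 0 = t.getD (kmpWhile t fail i k) 0) := by
  intro k
  induction k using Nat.strong_induction_on with
  | _ k ih =>
    intro hk hki hinv
    by_cases hc : k ≠ 0 ∧ t.getD i 0 ≠ t.getD k 0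
    · have hlen : (t.take i).length = i := by
        rw [List.length_take]; omega
      have hkpos : 1 ≤ k := Nat.one_le_iff_ne_zero.mpr hc.1
      have hfk : fail.getD (k - 1) 0 = mb (t.take k) := by
        have := hfail (k - 1) (by omega)
        rwa [show k - 1 + 1 = k by omega] at this
      have htk : t.take k = (t.take i).take k := by
        rw [List.take_take, Nat.min_eq_left (by omega)]
      have hulen : ((t.take i).take k).length = k := by
        rw [List.length_take, hlen, Nat.min_eq_left (by omega)]
      have hune : (t.take i).take k ≠ [] := by
        intro h; rw [h] at hulen; simp at hulen; omega
      set k' := fail.getD (k - 1) 0 with hk'def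
      have hk'mb : k' = mb ((t.take i).take k) := by rw [hfk, htk]
      have hk'lt : k' < k := by
        have := mb_lt ((t.take i).take k) hune
        rw [hulen] at this; omega
      have hstep : kmpWhile t fail i k = kmpWhile t fail i k' := by
        rw [kmpWhile, if_pos hc]
        show (if _ : fail.getD (k - 1) 0 < k then
            kmpWhile t fail i (fail.getD (k - 1) 0) else k) = kmpWhile t fail i k'
        rw [dif_pos hk'lt]
      rw [hstep]
      apply ih k' hk'lt
      · exact chain1 (t.take i) k k' hk (by omega) (hk'mb ▸ mb_mbP _) (by omega)
      · omega
      · intro j hj1 hj2 hmb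
        rcases lt_trichotomy j k with hlt | heq | hgt
        · exfalso
          have hjb : mbP ((t.take i).take k) j :=
            chain2 (t.take i) k j hk (by omega) hmb (by omega)
          have : j ≤ mb ((t.take i).take k) :=
            mb_greatest _ j hjb (by rw [hulen]; omega)
          rw [← hk'mb] at this; omega
        · subst heq; exact hc.2
        · exact hinv j hgt hj2 hmb
    · have hstop : kmpWhile t fail i k = k := by
        rw [kmpWhile, if_neg hc]
      rw [hstop]
      refine ⟨hk, hki, hinv, ?_⟩
      by_cases h0 : k = 0
      · exact Or.inl h0
      · right; by_contra hne; exact hc ⟨h0, hne⟩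

-- one outer-loop step turns mb (t.take i) into mb (t.take (i+1))
theorem kmpStep_k (t : List Int) (fail : List Nat) (i : Nat) (hi1 : 1 ≤ i) (hi : i < t.length)
    (hfail : ∀ j < i, fail.getD j 0 = mb (t.take (j + 1))) :
    (kmpStep t (fail, mb (t.take i)) i).2 = mb (t.take (i + 1)) := by
  have hlen : (t.take i).length = i := by rw [List.length_take]; omega
  have hsne : t.take i ≠ [] := by
    intro h; rw [h] at hlen; simp at hlen; omega
  have getD_take : ∀ m : Nat, m < i → (t.take i).getD m 0 = t.getD m 0 := by
    intro m hm
    rw [List.getD_eq_getElem _ _ (by rw [hlen]; exact hm),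
        List.getD_eq_getElem _ _ (by omega), List.getElem_take]
  have hk : mbP (t.take i) (mb (t.take i)) := mb_mbP _
  have hki : mb (t.take i) < i := by have := mb_lt _ hsne; omega
  have hinv : ∀ j, mb (t.take i) < j → j < i → mbP (t.take i) j →
      t.getD i 0 ≠ t.getD j 0 := by
    intro j h1 h2 hmb
    have := mb_greatest (t.take i) j hmb (by omega)
    omega
  obtain ⟨p1, p2, p3, p4⟩ := kmpWhile_spec t fail i hi hfail (mb (t.take i)) hk hki hinv
  set k0 := kmpWhile t fail i (mb (t.take i)) with hk0
  have hsplit : t.take (i + 1) = t.take i ++ [t.getD i 0] := by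
    rw [List.take_add_one]
    simp [List.getD_eq_getElem?_getD, List.getElem?_eq_getElem hi]
  have hlen' : (t.take (i + 1)).length = i + 1 := by rw [List.length_take]; omega
  have hmbdef : mb (t.take (i + 1)) = Nat.findGreatest (mbP (t.take (i + 1))) i := by
    unfold mb; rw [show (List.take (i + 1) t).length - 1 = i from by rw [hlen']; omega]
  show (if t.getD i 0 == t.getD k0 0 then k0 + 1 else k0) = mb (t.take (i + 1))
  by_cases hbe : t.getD i 0 = t.getD k0 0
  · rw [if_pos (by exact beq_iff_eq.mpr hbe)]
    have hP : mbP (t.take (i + 1)) (k0 + 1) := by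
      rw [hsplit]
      refine (mbP_ext (t.take i) (t.getD i 0) k0 (by omega)).mpr ⟨p1, ?_⟩
      rw [getD_take k0 p2]; exact hbe.symm
    have hle : k0 + 1 ≤ mb (t.take (i + 1)) := by
      rw [hmbdef]; exact Nat.le_findGreatest (by omega) hP
    have hge : mb (t.take (i + 1)) ≤ k0 + 1 := by
      by_contra hgt
      rw [not_le] at hgt
      have hgle : mb (t.take (i + 1)) ≤ i := by
        rw [hmbdef]; exact Nat.findGreatest_le i
      have hgP : mbP (t.take (i + 1)) (mb (t.take (i + 1))) := mb_mbP _
      obtain ⟨m, hm⟩ : ∃ m, mb (t.take (i + 1)) = m + 1 := ⟨_, (Nat.succ_pred_eq_of_pos (by omega)).symm⟩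
      rw [hm] at hgP hgt hgle
      rw [hsplit] at hgP
      obtain ⟨hq1, hq2⟩ := (mbP_ext (t.take i) (t.getD i 0) m (by omega)).mp hgP
      rw [getD_take m (by omega)] at hq2
      exact p3 m (by omega) (by omega) hq1 hq2.symm
    omega
  · rw [if_neg (by simpa using hbe)]
    have hk00 : k0 = 0 := p4.resolve_right hbe
    rw [hk00]
    symm
    rw [hmbdef]
    rw [Nat.findGreatest_eq_zero_iff]
    intro j hj0 hji hPj
    obtain ⟨m, hm⟩ : ∃ m, j = m + 1 := ⟨j - 1, by omega⟩
    rw [hm, hsplit] at hPj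
    obtain ⟨hq1, hq2⟩ := (mbP_ext (t.take i) (t.getD i 0) m (by omega)).mp hPj
    rw [getD_take m (by omega)] at hq2
    by_cases hm0 : m = 0
    · rw [hm0] at hq2
      rw [hk00] at hbe
      exact hbe (by rw [hq2])
    · exact p3 m (by omega) (by omega) hq1 hq2.symm

-- fail-table invariant through the fold
theorem kmpFold_inv (t : List Int) :
    ∀ (cnt i : Nat) (fail : List Nat),
      1 ≤ i → i + cnt ≤ t.length → fail.length = t.length →
      (∀ j < i, fail.getD j 0 = mb (t.take (j + 1))) →
      ((List.range' i cnt).foldl (kmpStep t) (fail, mb (t.take i))).1.length = t.length ∧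
      (∀ j < i + cnt,
        ((List.range' i cnt).foldl (kmpStep t) (fail, mb (t.take i))).1.getD j 0 = mb (t.take (j + 1))) := by
  intro cnt
  induction cnt with
  | zero =>
    intro i fail h1 h2 h3 h4
    simpa using ⟨h3, fun j hj => h4 j (by omega)⟩
  | succ cnt ih =>
    intro i fail h1 h2 h3 h4
    have hi : i < t.length := by omega
    have hk1 : (kmpStep t (fail, mb (t.take i)) i).2 = mb (t.take (i + 1)) :=
      kmpStep_k t fail i h1 hi h4
    have hstate : kmpStep t (fail, mb (t.take i)) i =
        (fail.set i (mb (t.take (i + 1))), mb (t.take (i + 1))) := by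
      have : kmpStep t (fail, mb (t.take i)) i =
          (fail.set i ((kmpStep t (fail, mb (t.take i)) i).2), (kmpStep t (fail, mb (t.take i)) i).2) := rfl
      rw [this, hk1]
    have hfold : (List.range' i (cnt + 1)).foldl (kmpStep t) (fail, mb (t.take i)) =
        (List.range' (i + 1) cnt).foldl (kmpStep t) (fail.set i (mb (t.take (i + 1))), mb (t.take (i + 1))) := by
      rw [List.range'_succ, List.foldl_cons, hstate]
    rw [hfold]
    have hset : ∀ j < i + 1, (fail.set i (mb (t.take (i + 1)))).getD j 0 = mb (t.take (j + 1)) := by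
      intro j hj
      by_cases hji : j = i
      · subst hji
        rw [List.getD_eq_getElem _ _ (by rw [List.length_set]; omega)]
        rw [List.getElem_set_self]
      · rw [List.getD_eq_getElem?_getD, List.getElem?_set_ne (by omega),
            ← List.getD_eq_getElem?_getD]
        exact h4 j (by omega)
    obtain ⟨r1, r2⟩ := ih (i + 1) (fail.set i (mb (t.take (i + 1)))) (by omega) (by omega)
      (by rw [List.length_set]; exact h3) hset
    exact ⟨r1, fun j hj => r2 j (by omega)⟩

-- the last fail entry is the longest proper border of the whole row
theorem kmpFold_spec (t : List Int) (n : Nat) (hn : n = t.length) (h1 : 1 ≤ n) :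
    (((List.range' 1 (n - 1)).foldl (kmpStep t) (List.replicate n 0, 0)).1).getD (n - 1) 0 = mb t := by
  have hlen1 : (t.take 1).length = 1 := by rw [List.length_take]; omega
  have hmb1 : mb (t.take 1) = 0 := by
    unfold mb; rw [show (List.take 1 t).length - 1 = 0 from by rw [hlen1]]
    exact Nat.findGreatest_zero
  obtain ⟨r1, r2⟩ := kmpFold_inv t (n - 1) 1 (List.replicate n 0) (by omega) (by omega)
    (by rw [List.length_replicate]; omega)
    (by intro j hj
        have : j = 0 := by omega
        subst this
        rw [List.getD_eq_getElem _ _ (by rw [List.length_replicate]; omega)]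
        simp [hmb1])
  rw [hmb1] at r2
  have := r2 (n - 1) (by omega)
  rw [this, show n - 1 + 1 = n by omega, hn, List.take_length]

-- A's validity check ⟺ border of length n - p
theorem aValid_iff (row : List Int) (p : Nat) (hp : 1 ≤ p) (hpn : p ≤ row.length) :
    aValid row row.length p = true ↔ mbP row (row.length - p) := by
  have hall : aValid row row.length p = true ↔
      ∀ c < row.length, row.getD c 0 = row.getD (c % p) 0 := by
    simp [aValid]
  rw [hall]
  have hsub : row.length - (row.length - p) = p := by omega
  constructor
  · intro h
    unfold mbP
    rw [hsub]
    apply List.ext_getElem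
    · simp
    · intro i h1 h2
      have hi1 : i < row.length := by simp at h1; omega
      have hi2 : p + i < row.length := by simp at h2; omega
      have e1 := h i hi1
      have e2 := h (p + i) hi2
      rw [Nat.add_mod_left] at e2
      rw [List.getElem_take, List.getElem_drop]
      calc row[i] = row.getD i 0 := (List.getD_eq_getElem row 0 hi1).symm
        _ = row.getD (i % p) 0 := e1
        _ = row.getD (p + i) 0 := e2.symm
        _ = row[p + i] := List.getD_eq_getElem row 0 hi2
  · intro hmb
    have hshift : ∀ i, i < row.length - p → row.getD (p + i) 0 = row.getD i 0 := by
      intro i hi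
      unfold mbP at hmb
      rw [hsub] at hmb
      have h1 : i < (row.take (row.length - p)).length := by simp; omega
      have h2 : i < (row.drop p).length := by simp; omega
      have := congrArg (fun l => l[i]?) hmb
      simp only [List.getElem?_eq_getElem h1, List.getElem?_eq_getElem h2] at this
      rw [List.getElem_take, List.getElem_drop] at this
      rw [List.getD_eq_getElem row 0 (by omega), List.getD_eq_getElem row 0 (by omega)]
      simp only [Option.some_inj] at this
      rw [this]
    intro c
    induction c using Nat.strong_induction_on with
    | _ c ih =>
      intro hc
      by_cases hcp : c < p
      · rw [Nat.mod_eq_of_lt hcp]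
      · have hge : p ≤ c := by omega
        have e1 : row.getD c 0 = row.getD (c - p) 0 := by
          have := hshift (c - p) (by omega)
          rw [show p + (c - p) = c by omega] at this
          exact this
        rw [e1, ih (c - p) (by omega) (by omega)]
        congr 1
        rw [Nat.mod_eq_sub_mod hge]

theorem aLoop_aux (row : List Int) (n pstar : Nat) (hv : aValid row n pstar = true)
    (hmin : ∀ q, 1 ≤ q → q < pstar → ¬ aValid row n q = true) :
    ∀ cnt s, 1 ≤ s → s ≤ pstar → pstar < s + cnt →
      aLoop row n (List.range' s cnt) = some pstar := by
  intro cnt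
  induction cnt with
  | zero => intro s _ _ _; omega
  | succ cnt ih =>
    intro s hs1 hs2 hs3
    rw [List.range'_succ]
    by_cases hsp : s = pstar
    · subst hsp
      unfold aLoop
      rw [if_pos hv]
    · have : ¬ aValid row n s = true := hmin s hs1 (by omega)
      unfold aLoop
      rw [if_neg this]
      exact ih (s + 1) (by omega) (by omega) (by omega)

-- A's scan returns n - mb row
theorem aLoop_eq (row : List Int) (h1 : 1 ≤ row.length) :
    aLoop row row.length (List.range' 1 row.length) = some (row.length - mb row) := by
  have hne : row ≠ [] := by intro h; rw [h] at h1; simp at h1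
  have hmblt : mb row < row.length := mb_lt row hne
  have hv : aValid row row.length (row.length - mb row) = true := by
    rw [aValid_iff row _ (by omega) (by omega)]
    rw [show row.length - (row.length - mb row) = mb row by omega]
    exact mb_mbP row
  have hmin : ∀ q, 1 ≤ q → q < row.length - mb row → ¬ aValid row row.length q = true := by
    intro q hq1 hq2 hval
    rw [aValid_iff row q hq1 (by omega)] at hval
    have := mb_greatest row (row.length - q) hval (by omega)
    omega
  exact aLoop_aux row row.length (row.length - mb row) hv hmin row.length 1 (le_refl 1)
    (by omega) (by omega)

-- tiling: modulo comprehension = truncated repetition of the unit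
theorem flat_rep (u : List Int) (hu : u ≠ []) :
    ∀ (q i : Nat), i < q * u.length →
      (List.flatten (List.replicate q u)).getD i 0 = u.getD (i % u.length) 0 := by
  intro q
  induction q with
  | zero => intro i h; omega
  | succ q ih =>
    intro i h
    rw [List.replicate_succ, List.flatten_cons]
    by_cases hi : i < u.length
    · rw [List.getD_append _ _ _ _ hi, Nat.mod_eq_of_lt hi]
    · have hge : u.length ≤ i := by omega
      have hpos : 0 < u.length := List.length_pos_iff.mpr hu
      rw [List.getD_append_right _ _ _ _ hge]
      rw [ih (i - u.length) (by
        have : (q + 1) * u.length = q * u.length + u.length := by ring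
        omega)]
      congr 1
      rw [Nat.mod_eq_sub_mod hge]

theorem tiling_eq (row : List Int) (p m : Nat) (hp : 1 ≤ p) (hpn : p ≤ row.length) :
    (List.range m).map (fun c => row.getD (c % p) 0) =
      (List.flatten (List.replicate (m / p + 1) (row.take p))).take m := by
  have hul : (row.take p).length = p := by rw [List.length_take]; omega
  have hune : row.take p ≠ [] := by
    intro h; rw [h] at hul; simp at hul; omega
  have hflen : (List.flatten (List.replicate (m / p + 1) (row.take p))).length = (m / p + 1) * p := by
    simp [hul]
  have hdm := Nat.div_add_mod m p
  have hmlt : m % p < p := Nat.mod_lt m (by omega)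
  have hmle : m ≤ (m / p + 1) * p := by
    have : (m / p + 1) * p = p * (m / p) + p := by ring
    omega
  apply List.ext_getElem
  · simp [hflen]; omega
  · intro i h1 h2
    have him : i < m := by simpa using h1
    rw [List.getElem_map, List.getElem_range, List.getElem_take]
    have hif : i < (m / p + 1) * p := by omega
    rw [← List.getD_eq_getElem _ 0 (by rw [hflen]; exact hif)]
    rw [flat_rep (row.take p) hune (m / p + 1) i (by rw [hul]; exact hif)]
    rw [hul]
    have hmp : i % p < p := Nat.mod_lt i (by omega)
    conv_rhs => rw [List.getD_eq_getElem _ 0 (show i % p < (List.take p row).length by rw [hul]; exact hmp)]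
    rw [List.getElem_take]
    exact List.getD_eq_getElem row 0 (by omega)

-- getD on a prefix agrees with getD on the row
theorem getD_take_tr (row : List Int) (cols m : Nat) (hm : m < cols) (hle : cols ≤ row.length) :
    (row.take cols).getD m 0 = row.getD m 0 := by
  rw [List.getD_eq_getElem _ 0 (by rw [List.length_take]; omega),
      List.getD_eq_getElem _ 0 (by omega), List.getElem_take]

theorem all_congr' (l : List Nat) (f g : Nat → Bool) (h : ∀ x ∈ l, f x = g x) :
    l.all f = l.all g := by
  induction l with
  | nil => rfl
  | cons a l ih =>
    simp only [List.all_cons]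
    rw [h a List.mem_cons_self, ih (fun x hx => h x (List.mem_cons_of_mem a hx))]

-- A's check only reads the first cols entries of the row
theorem aValid_transfer (row : List Int) (cols p : Nat) (hp : 1 ≤ p) (hpc : p ≤ cols)
    (hle : cols ≤ row.length) :
    aValid row cols p = aValid (row.take cols) cols p := by
  unfold aValid
  apply all_congr'
  intro c hc
  rw [List.mem_range] at hc
  have hcp : c % p < cols := lt_of_lt_of_le (Nat.mod_lt c (by omega)) hpc
  rw [getD_take_tr row cols c hc hle, getD_take_tr row cols (c % p) hcp hle]

theorem aLoop_transfer (row : List Int) (cols : Nat) (hle : cols ≤ row.length) :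
    ∀ l : List Nat, (∀ p ∈ l, 1 ≤ p ∧ p ≤ cols) →
      aLoop row cols l = aLoop (row.take cols) cols l := by
  intro l
  induction l with
  | nil => intro _; rfl
  | cons p ps ih =>
    intro h
    obtain ⟨hp1, hp2⟩ := h p List.mem_cons_self
    unfold aLoop
    rw [aValid_transfer row cols p hp1 hp2 hle]
    by_cases hv : aValid (row.take cols) cols p = true
    · rw [if_pos hv, if_pos hv]
    · rw [if_neg hv, if_neg hv]
      exact ih (fun q hq => h q (List.mem_cons_of_mem p hq))

-- per-row equality of the two ports
theorem pv_row_eq (row : List Int) (cols : Nat)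
    (hpre : row.all (fun v => v == 0) = true ∨ cols ≤ row.length) :
    (if row.all (fun v => v == 0) then List.replicate (cols * 2) 0
     else
       match aLoop row cols (List.range' 1 cols) with
       | some p => (List.range (cols * 2)).map (fun c => row.getD (c % p) 0)
       | none => []) =
    (if (row.take cols).all (fun v => v == 0) then List.replicate (2 * cols) 0
     else
       (List.flatten (List.replicate (2 * cols /
           (cols - (((List.range' 1 (cols - 1)).foldl (kmpStep (row.take cols)) (List.replicate cols 0, 0)).1.getD (cols - 1) 0)) + 1)
           ((row.take cols).take (cols - (((List.range' 1 (cols - 1)).foldl (kmpStep (row.take cols)) (List.replicate cols 0, 0)).1.getD (cols - 1) 0))))).take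
         (2 * cols)) := by
  by_cases hz : (row.take cols).all (fun v => v == 0) = true
  · rw [if_pos hz]
    by_cases hrz : row.all (fun v => v == 0) = true
    · rw [if_pos hrz, Nat.mul_comm]
    · rw [if_neg hrz]
      have hle : cols ≤ row.length := hpre.resolve_left hrz
      by_cases hc0 : cols = 0
      · subst hc0
        simp [aLoop]
      · have hc1 : 1 ≤ cols := by omega
        have hzero : ∀ c, c < cols → row.getD c 0 = 0 := by
          intro c hc
          have := List.all_eq_true.mp hz _ (List.getElem_mem
            (show c < (row.take cols).length by rw [List.length_take]; omega))
          rw [← getD_take_tr row cols c hc hle,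
              List.getD_eq_getElem _ 0 (by rw [List.length_take]; omega)]
          simpa using this
        have hv1 : aValid row cols 1 = true := by
          unfold aValid
          rw [List.all_eq_true]
          intro c hc
          rw [List.mem_range] at hc
          simp only [Nat.mod_one, beq_iff_eq]
          rw [hzero c hc, hzero 0 (by omega)]
        have hloop : aLoop row cols (List.range' 1 cols) = some 1 := by
          obtain ⟨m, hm⟩ : ∃ m, cols = m + 1 := ⟨cols - 1, by omega⟩
          rw [hm] at hv1 ⊢
          rw [List.range'_succ]
          unfold aLoop
          rw [if_pos hv1]
        rw [hloop]
        show (List.range (cols * 2)).map (fun c => row.getD (c % 1) 0) =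
          List.replicate (2 * cols) 0
        rw [List.eq_replicate_iff]
        refine ⟨by simp [Nat.mul_comm], ?_⟩
        intro b hb
        simp only [List.mem_map, List.mem_range] at hb
        obtain ⟨c, _, rfl⟩ := hb
        rw [Nat.mod_one]
        exact hzero 0 (by omega)
  · rw [if_neg hz]
    have hrz : ¬ row.all (fun v => v == 0) = true := by
      intro hall
      apply hz
      rw [List.all_eq_true] at hall ⊢
      exact fun v hv => hall v (List.mem_of_mem_take hv)
    rw [if_neg hrz]
    have hle : cols ≤ row.length := hpre.resolve_left hrz
    have hc1 : 1 ≤ cols := by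
      by_contra h
      apply hz
      rw [show cols = 0 by omega]
      simp
    have hts : (row.take cols).length = cols := by rw [List.length_take]; omega
    have htrans : aLoop row cols (List.range' 1 cols) = aLoop (row.take cols) cols (List.range' 1 cols) := by
      apply aLoop_transfer row cols hle
      intro p hp
      rw [List.mem_range'_1] at hp
      omega
    rw [htrans]
    have htne : row.take cols ≠ [] := by
      intro h; rw [h] at hts; simp at hts; omega
    have hmblt : mb (row.take cols) < cols := by
      have := mb_lt (row.take cols) htne; omega
    have h1 : 1 ≤ (row.take cols).length := by omega
    rw [kmpFold_spec (row.take cols) cols hts.symm (by omega)]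
    have hp1 : 1 ≤ cols - mb (row.take cols) := by omega
    have hpn : cols - mb (row.take cols) ≤ (row.take cols).length := by omega
    have htile := tiling_eq (row.take cols) (cols - mb (row.take cols)) (2 * cols) hp1 hpn
    rw [← htile]
    have hloop2 : aLoop (row.take cols) cols (List.range' 1 cols) =
        some (cols - mb (row.take cols)) := by
      have := aLoop_eq (row.take cols) h1
      rw [hts] at this
      exact this
    rw [hloop2]
    rw [Nat.mul_comm cols 2]
    apply List.map_congr_left
    intro c _
    have hcp : c % (cols - mb (row.take cols)) < cols :=
      lt_of_lt_of_le (Nat.mod_lt c (by omega)) (by omega)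
    rw [getD_take_tr row cols _ hcp hle]

-- ===== VERDICT (by name: the statement is the Claim_ definition above) =====
theorem solve_963e52fc_spec : Claim_equal_solve_963e52fc := by
  intro grid _ hpre
  unfold Spec_solve_963e52fc solve_963e52fc solve_963e52fc_alt
  dsimp only
  apply List.map_congr_left
  intro row hrow
  exact pv_row_eq row _ (hpre.2 row hrow)
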